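-- pv_equiv track=rewrite | github.com/pipecat-ai/gradient-bang | src/gradientbang/scripts/universe_bang.py | compute_distance_map
-- ===== SOURCE A (Python) =====
-- from collections import deque
-- from typing import Dict, List, Set, Tuple, Optional
--
-- def bfs_distances(adjacency: Dict[int, List[int]], start: int) -> Dict[int, int]:
--     distances: Dict[int, int] = {start: 0}
--     queue: deque[int] = deque([start])
--     while queue:
--         current = queue.popleft()
--         current_distance = distances[current]
--         for neighbor in adjacency.get(current, []):
--             if neighbor in distances:
--                 continue
--             distances[neighbor] = current_distance + 1
--             queue.append(neighbor)
--     return distances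
--
-- def compute_distance_map(
--     adjacency: Dict[int, List[int]],
--     nodes: List[int],
-- ) -> Dict[int, Dict[int, int]]:
--     node_set = set(nodes)
--     distances: Dict[int, Dict[int, int]] = {}
--     for node in nodes:
--         full = bfs_distances(adjacency, node)
--         distances[node] = {target: dist for target, dist in full.items() if target in node_set}
--     return distances
-- ===== SOURCE B (Python) =====
-- def bfs_levels(adjacency, start):
--     distances = {start: 0}
--     frontier = [start]
--     level = 0
--     while frontier:
--         level += 1
--         next_frontier = []
--         for current in frontier:
--             for neighbor in adjacency.get(current, []):
--                 if neighbor not in distances: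
--                     distances[neighbor] = level
--                     next_frontier.append(neighbor)
--         frontier = next_frontier
--     return distances
--
--
-- def compute_distance_map(adjacency, nodes):
--     node_set = set(nodes)
--     return {
--         node: {target: dist for target, dist in bfs_levels(adjacency, node).items()
--                if target in node_set}
--         for node in nodes
--     }
-- ===== Notes on version B (the rewrite author's own statement) =====
-- stated objective: alternative
-- what changed: Replaces the deque-based one-node-at-a-time BFS (which reads distances[current] to compute each neighbor's distance) with a level-synchronous BFS that iterates over whole frontiers, assigning a level counter as the distance, and builds the result with a dict comprehension.
import Mathlib
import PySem

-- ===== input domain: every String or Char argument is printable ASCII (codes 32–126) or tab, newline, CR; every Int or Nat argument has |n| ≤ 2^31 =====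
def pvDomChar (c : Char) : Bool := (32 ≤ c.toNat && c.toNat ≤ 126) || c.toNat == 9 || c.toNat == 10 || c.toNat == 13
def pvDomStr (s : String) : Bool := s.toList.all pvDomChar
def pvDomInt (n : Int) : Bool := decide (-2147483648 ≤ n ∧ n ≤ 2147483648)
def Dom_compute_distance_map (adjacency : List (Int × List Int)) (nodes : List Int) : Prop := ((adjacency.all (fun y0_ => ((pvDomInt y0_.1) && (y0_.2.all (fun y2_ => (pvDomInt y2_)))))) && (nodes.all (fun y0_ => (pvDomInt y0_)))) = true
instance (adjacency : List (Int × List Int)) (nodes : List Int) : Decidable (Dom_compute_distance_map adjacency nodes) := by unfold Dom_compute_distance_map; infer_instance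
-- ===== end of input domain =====

-- B replaces the deque-based one-node-at-a-time BFS with a level-synchronous BFS over whole
-- frontiers (the level counter is the distance); same cost, a different decomposition.

-- ===== PORT A =====
-- A's inner `for neighbor in adjacency.get(current, [])` loop body, state (distances, queue)
def bfsStep (v : Int) (st : PySem.Dict Int Int × List Int) (n : Int) :
    PySem.Dict Int Int × List Int :=
  if st.1.contains n then st else (st.1.insert n v, st.2 ++ [n])

-- Termination bookkeeping for the BFS loops (not part of either Python's data):
-- every node ever enqueued (except the start) occurs as a neighbour in `adjacency`.
def neighborPool (adjacency : List (Int × List Int)) : List Int := adjacency.flatMap Prod.snd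

def pendingCount (adjacency : List (Int × List Int)) (dist : PySem.Dict Int Int) : Nat :=
  ((neighborPool adjacency).filter (fun n => !(dist.contains n))).length

theorem mem_neighborPool (adjacency : List (Int × List Int)) (c x : Int)
    (hx : x ∈ (PySem.Dict.mk adjacency).getD c []) : x ∈ neighborPool adjacency := by
  unfold neighborPool
  simp only [PySem.Dict.getD, PySem.Dict.get?] at hx
  cases hf : List.find? (fun p => p.1 == c) adjacency with
  | none => simp [hf] at hx
  | some p =>
    simp only [hf, Option.map_some, Option.getD_some] at hx
    exact List.mem_flatMap.mpr ⟨p, List.mem_of_find?_eq_some hf, hx⟩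

theorem pendingCount_insert_lt (adjacency : List (Int × List Int)) (d : PySem.Dict Int Int)
    (n v : Int) (hn : n ∈ neighborPool adjacency) (hc : d.contains n = false) :
    pendingCount adjacency (d.insert n v) < pendingCount adjacency d := by
  unfold pendingCount
  have hrw : (neighborPool adjacency).filter (fun m => !(d.insert n v).contains m)
      = ((neighborPool adjacency).filter (fun m => !(d.contains m))).filter (fun m => !(m == n)) := by
    rw [List.filter_filter]
    apply List.filter_congr
    intro m _
    rw [PySem.Dict.contains_insert]
    cases (m == n) <;> cases d.contains m <;> simp
  rw [hrw]
  apply List.length_filter_lt_length_iff_exists.mpr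
  exact ⟨n, List.mem_filter.mpr ⟨hn, by simp [hc]⟩, by simp⟩

theorem bfsStep_shift (v : Int) (ns : List Int) (d : PySem.Dict Int Int) (q : List Int) :
    ns.foldl (bfsStep v) (d, q) =
      ((ns.foldl (bfsStep v) (d, [])).1, q ++ (ns.foldl (bfsStep v) (d, [])).2) := by
  induction ns generalizing d q with
  | nil => simp
  | cons n ns ih =>
    simp only [List.foldl_cons, bfsStep]
    cases hc : d.contains n with
    | true => simp only [if_true]; exact ih d q
    | false =>
      simp only [Bool.false_eq_true, if_false]
      rw [ih (d.insert n v) (q ++ [n]), ih (d.insert n v) ([] ++ [n])]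
      simp [List.append_assoc]

theorem bfsStep_measure (adjacency : List (Int × List Int)) (v : Int) (ns : List Int)
    (hns : ∀ x ∈ ns, x ∈ neighborPool adjacency) (d : PySem.Dict Int Int) (q : List Int) :
    pendingCount adjacency (ns.foldl (bfsStep v) (d, q)).1
        + (ns.foldl (bfsStep v) (d, q)).2.length
      ≤ pendingCount adjacency d + q.length := by
  induction ns generalizing d q with
  | nil => simp
  | cons n ns ih =>
    simp only [List.foldl_cons, bfsStep]
    cases hc : d.contains n with
    | true =>
      simp only [if_true]
      exact ih (fun x hx => hns x (List.mem_cons_of_mem _ hx)) d q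
    | false =>
      simp only [Bool.false_eq_true, if_false]
      have h1 := ih (fun x hx => hns x (List.mem_cons_of_mem _ hx)) (d.insert n v) (q ++ [n])
      have h2 := pendingCount_insert_lt adjacency d n v (hns n List.mem_cons_self) hc
      simp only [List.length_append, List.length_cons, List.length_nil] at *
      omega

-- while queue: current = queue.popleft(); … (distances[current] is always present: every
-- queued node was inserted into distances before being enqueued, so the getD default is unused)
def bfsLoop (adjacency : List (Int × List Int)) (dist : PySem.Dict Int Int)
    (queue : List Int) : PySem.Dict Int Int :=
  match queue with
  | [] => dist
  | current :: rest =>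
    bfsLoop adjacency
      (((PySem.Dict.mk adjacency).getD current []).foldl
        (bfsStep (dist.getD current 0 + 1)) (dist, rest)).1
      (((PySem.Dict.mk adjacency).getD current []).foldl
        (bfsStep (dist.getD current 0 + 1)) (dist, rest)).2
termination_by 2 * pendingCount adjacency dist + queue.length
decreasing_by
  have hns := fun x hx => mem_neighborPool adjacency current x hx
  have h1 := bfsStep_measure adjacency (dist.getD current 0 + 1)
    ((PySem.Dict.mk adjacency).getD current []) hns dist rest
  have h3 := bfsStep_shift (dist.getD current 0 + 1)
    ((PySem.Dict.mk adjacency).getD current []) dist rest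
  simp only [h3, List.length_append, List.length_cons] at *
  omega

def bfs_distances (adjacency : List (Int × List Int)) (start : Int) : PySem.Dict Int Int :=
  bfsLoop adjacency (PySem.Dict.mk [(start, 0)]) [start]

def compute_distance_map (adjacency : List (Int × List Int)) (nodes : List Int) :
    List (Int × List (Int × Int)) :=
  let node_set : PySem.Set Int := PySem.Set.ofList nodes
  (nodes.foldl (fun d node =>
      d.insert node
        (((bfs_distances adjacency node).items.foldl
            (fun inner p => if PySem.Set.contains node_set p.1 then inner.insert p.1 p.2 else inner)
            (PySem.Dict.mk [])).items))
    (PySem.Dict.mk ([] : List (Int × List (Int × Int))))).items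

-- ===== PORT B =====
-- B's inner `for neighbor in adjacency.get(current, [])` loop body, state (distances, next_frontier)
def lvlStep (v : Int) (st : PySem.Dict Int Int × List Int) (n : Int) :
    PySem.Dict Int Int × List Int :=
  if st.1.contains n then st else (st.1.insert n v, st.2 ++ [n])

theorem lvlStep_eq_bfsStep : lvlStep = bfsStep := rfl

theorem frontier_measure (adjacency : List (Int × List Int)) (v : Int) (fr : List Int) :
    ∀ (d : PySem.Dict Int Int) (q : List Int),
    pendingCount adjacency
        ((fr.foldl (fun st c => ((PySem.Dict.mk adjacency).getD c []).foldl (lvlStep v) st)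
          (d, q))).1
      + ((fr.foldl (fun st c => ((PySem.Dict.mk adjacency).getD c []).foldl (lvlStep v) st)
          (d, q))).2.length
      ≤ pendingCount adjacency d + q.length := by
  intro d q
  induction fr generalizing d q with
  | nil => simp
  | cons c fr ih =>
    simp only [List.foldl_cons, lvlStep_eq_bfsStep]
    have h1 := bfsStep_measure adjacency v ((PySem.Dict.mk adjacency).getD c [])
      (fun x hx => mem_neighborPool adjacency c x hx) d q
    have h2 := ih (((PySem.Dict.mk adjacency).getD c []).foldl (bfsStep v) (d, q)).1
      (((PySem.Dict.mk adjacency).getD c []).foldl (bfsStep v) (d, q)).2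
    simp only [lvlStep_eq_bfsStep, Prod.mk.eta] at h2
    omega

-- while frontier: level += 1; next_frontier = []; nested for-loops; frontier = next_frontier
def levelLoop (adjacency : List (Int × List Int)) (dist : PySem.Dict Int Int)
    (frontier : List Int) (level : Int) : PySem.Dict Int Int :=
  if h : frontier = [] then dist
  else
    levelLoop adjacency
      ((frontier.foldl
        (fun st current => ((PySem.Dict.mk adjacency).getD current []).foldl (lvlStep (level + 1)) st)
        (dist, []))).1
      ((frontier.foldl
        (fun st current => ((PySem.Dict.mk adjacency).getD current []).foldl (lvlStep (level + 1)) st)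
        (dist, []))).2
      (level + 1)
termination_by 2 * pendingCount adjacency dist + frontier.length
decreasing_by
  have h1 := frontier_measure adjacency (level + 1) frontier dist []
  have hl : 0 < frontier.length := List.length_pos_iff.mpr h
  simp only [List.length_nil] at h1
  rw [List.foldl_subtype
    (g := fun st c => ((PySem.Dict.mk adjacency).getD c []).foldl (lvlStep (level + 1)) st)
    (fun b x h => rfl), List.unattach_attach]
  omega

def bfs_levels (adjacency : List (Int × List Int)) (start : Int) : PySem.Dict Int Int :=
  levelLoop adjacency (PySem.Dict.mk [(start, 0)]) [start] 0

def compute_distance_map_alt (adjacency : List (Int × List Int)) (nodes : List Int) :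
    List (Int × List (Int × Int)) :=
  let node_set : PySem.Set Int := PySem.Set.ofList nodes
  (nodes.foldl (fun d node =>
      d.insert node
        (((bfs_levels adjacency node).items.foldl
            (fun inner p => if PySem.Set.contains node_set p.1 then inner.insert p.1 p.2 else inner)
            (PySem.Dict.mk [])).items))
    (PySem.Dict.mk ([] : List (Int × List (Int × Int))))).items

-- ===== PRECONDITION & SPEC =====
def Spec_compute_distance_map (adjacency : List (Int × List Int)) (nodes : List Int) (out : List (Int × List (Int × Int))) : Prop := out = compute_distance_map_alt adjacency nodes
instance (adjacency : List (Int × List Int)) (nodes : List Int) (out : List (Int × List (Int × Int))) : Decidable (Spec_compute_distance_map adjacency nodes out) := by unfold Spec_compute_distance_map; infer_instance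

-- ===== CLAIM (what is proved, stated in full; the proofs are below) =====
def Claim_equal_compute_distance_map : Prop := ∀ (adjacency : List (Int × List Int)) (nodes : List Int), Dom_compute_distance_map adjacency nodes → Spec_compute_distance_map adjacency nodes (compute_distance_map adjacency nodes)

-- ===== LEMMAS AND PROOFS =====

theorem bfsStep_get?_pres (v : Int) (ns : List Int) :
    ∀ (d : PySem.Dict Int Int) (q : List Int) (x w : Int), d.get? x = some w →
      ((ns.foldl (bfsStep v) (d, q)).1).get? x = some w := by
  induction ns with
  | nil => intro d q x w h; simpa using h
  | cons n ns ih =>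
    intro d q x w h
    simp only [List.foldl_cons, bfsStep]
    cases hc : d.contains n with
    | true => exact ih d q x w h
    | false =>
      simp only [Bool.false_eq_true, if_false]
      apply ih
      have hxn : x ≠ n := by
        intro he
        subst he
        rw [PySem.Dict.contains_eq_isSome_get?, h] at hc
        simp at hc
      rw [PySem.Dict.get?_insert_of_ne _ _ hxn]
      exact h

theorem bfsStep_mem_snd (v : Int) (ns : List Int) :
    ∀ (d : PySem.Dict Int Int) (q : List Int) (x : Int),
      x ∈ (ns.foldl (bfsStep v) (d, q)).2 →
      x ∈ q ∨ ((ns.foldl (bfsStep v) (d, q)).1).get? x = some v := by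
  induction ns with
  | nil => intro d q x h; exact Or.inl (by simpa using h)
  | cons n ns ih =>
    intro d q x h
    simp only [List.foldl_cons, bfsStep] at h ⊢
    cases hc : d.contains n with
    | true => exact ih d q x (by simpa [hc] using h)
    | false =>
      simp only [hc, Bool.false_eq_true, if_false] at h ⊢
      rcases ih (d.insert n v) (q ++ [n]) x h with hm | hv
      · rcases List.mem_append.mp hm with hq | hn
        · exact Or.inl hq
        · right
          have : x = n := by simpa using hn
          subst this
          exact bfsStep_get?_pres v ns (d.insert x v) (q ++ [x]) x v
            (PySem.Dict.get?_insert_self _ _ _)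
      · exact Or.inr hv

-- the level-synchronous continuation: finish the current frontier (`rest` still to process,
-- `nf` already collected, every `rest` node at distance lvl), then go on level by level
def levelCont (adjacency : List (Int × List Int)) (dist : PySem.Dict Int Int)
    (rest nf : List Int) (lvl : Int) : PySem.Dict Int Int :=
  levelLoop adjacency
    ((rest.foldl (fun st c => ((PySem.Dict.mk adjacency).getD c []).foldl (bfsStep (lvl + 1)) st)
      (dist, nf))).1
    ((rest.foldl (fun st c => ((PySem.Dict.mk adjacency).getD c []).foldl (bfsStep (lvl + 1)) st)
      (dist, nf))).2
    (lvl + 1)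

theorem bfsLoop_eq_levelCont (adjacency : List (Int × List Int)) :
    ∀ (k : Nat) (dist : PySem.Dict Int Int) (rest nf : List Int) (lvl : Int),
      2 * (2 * pendingCount adjacency dist + rest.length + nf.length)
          + (if nf = [] then 0 else 1) ≤ k →
      (∀ x ∈ rest, dist.get? x = some lvl) →
      (∀ x ∈ nf, dist.get? x = some (lvl + 1)) →
      bfsLoop adjacency dist (rest ++ nf) = levelCont adjacency dist rest nf lvl := by
  intro k
  induction k with
  | zero =>
    intro dist rest nf lvl hk h1 h2
    by_cases hnf : nf = []
    · subst hnf
      simp only [List.length_nil] at hk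
      have hr : rest = [] := List.length_eq_zero_iff.mp (by omega)
      subst hr
      simp [bfsLoop, levelCont, levelLoop]
    · simp only [if_neg hnf] at hk; omega
  | succ k ih =>
    intro dist rest nf lvl hk h1 h2
    match rest with
    | [] =>
      by_cases hnf : nf = []
      · subst hnf
        simp [bfsLoop, levelCont, levelLoop]
      · have hIH := ih dist nf [] (lvl + 1)
          (by simp [hnf] at hk ⊢; omega)
          h2 (by intro x hx; simp at hx)
        rw [List.append_nil] at hIH
        rw [List.nil_append, hIH]
        simp only [levelCont, List.foldl_nil]
        conv_rhs => rw [levelLoop]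
        rw [dif_neg hnf]
        simp only [lvlStep_eq_bfsStep]
    | c :: rest' =>
      have hcd : dist.getD c 0 = lvl := by
        rw [PySem.Dict.getD_eq_get?_getD, h1 c List.mem_cons_self]; rfl
      have hns : ∀ x ∈ (PySem.Dict.mk adjacency).getD c [], x ∈ neighborPool adjacency :=
        fun x hx => mem_neighborPool adjacency c x hx
      have hsh := bfsStep_shift (lvl + 1) ((PySem.Dict.mk adjacency).getD c []) dist (rest' ++ nf)
      have hm := bfsStep_measure adjacency (lvl + 1) ((PySem.Dict.mk adjacency).getD c [])
        hns dist []
      -- the state after processing c's neighbours from (dist, [])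
      set G := ((PySem.Dict.mk adjacency).getD c []).foldl (bfsStep (lvl + 1)) (dist, []) with hG
      have hIH := ih G.1 rest' (nf ++ G.2) lvl
        (by
          simp only [List.length_append, List.length_cons, List.length_nil] at hk hm ⊢
          split_ifs at hk ⊢ <;> omega)
        (by
          intro x hx
          exact bfsStep_get?_pres (lvl + 1) _ dist [] x lvl (h1 x (List.mem_cons_of_mem _ hx)))
        (by
          intro x hx
          rcases List.mem_append.mp hx with hx | hx
          · exact bfsStep_get?_pres (lvl + 1) _ dist [] x (lvl + 1) (h2 x hx)
          · rcases bfsStep_mem_snd (lvl + 1) _ dist [] x hx with h | h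
            · simp at h
            · exact h)
      rw [List.cons_append, bfsLoop, hcd, hsh]
      rw [List.append_assoc, hIH]
      simp only [levelCont, List.foldl_cons]
      rw [bfsStep_shift (lvl + 1) ((PySem.Dict.mk adjacency).getD c []) dist nf, ← hG]

theorem bfs_eq (adjacency : List (Int × List Int)) (start : Int) :
    bfs_distances adjacency start = bfs_levels adjacency start := by
  have h := bfsLoop_eq_levelCont adjacency
      (2 * (2 * pendingCount adjacency (PySem.Dict.mk [(start, 0)]) + 1 + 0) + 0)
      (PySem.Dict.mk [(start, 0)]) [start] [] 0
      (by simp)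
      (by
        intro x hx
        have : x = start := by simpa using hx
        subst this
        simp [PySem.Dict.get?_mk_cons])
      (by intro x hx; simp at hx)
  rw [List.append_nil] at h
  unfold bfs_distances bfs_levels
  rw [h]
  simp only [levelCont]
  conv_rhs => rw [levelLoop]
  rw [dif_neg (by simp : ¬([start] : List Int) = [])]
  simp only [lvlStep_eq_bfsStep]

-- ===== VERDICT (by name: the statement is the Claim_ definition above) =====
theorem compute_distance_map_spec : Claim_equal_compute_distance_map := by
  intro adjacency nodes _
  unfold Spec_compute_distance_map compute_distance_map compute_distance_map_alt
  simp only [bfs_eq]
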